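-- pv_equiv track=rewrite | github.com/miliar/Code_Jam_Webscraper | solutions_python/solutions_year17_round0_nr3/188.py | solve
-- ===== SOURCE A (Python) =====
-- def solve(n,k):
--
--     # hashtable for counting empty stalls (in row)
--     l = {n:1}
--
--     while True:
--         m = max(l)
--         rs = (m-1)//2
--         ls = m-1-rs
--         n = l.pop(m)
--         if n>=k:
--             return str(max(ls,rs))+" "+str(min(ls,rs))
--
--         for item in [ls,rs]:
--             if item in l:
--                 l[item] += n
--             else:
--                 l[item] = n
--         k -= n
-- ===== SOURCE B (Python) =====
-- def solve(n, k):
--     if k <= 1: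
--         m = n
--     elif k > n:
--         m = 0
--     else:
--         # person k sits in layer t = 2**d, the largest power of two <= k;
--         # that layer splits the row into t gaps of size q or q+1
--         t = 1
--         while 2 * t <= k:
--             t *= 2
--         q, r = divmod(n - t + 1, t)
--         m = q + 1 if k - t + 1 <= r else q
--     rs = (m - 1) // 2
--     return str(m - 1 - rs) + " " + str(rs)
-- ===== Notes on version B (the rewrite author's own statement) =====
-- stated objective: alternative
-- what changed: A repeatedly pops the max-size entry of a growing dict of gap counts; B computes the answer directly from arithmetic: the largest power of two t <= k locates the layer and one divmod gives the gap size, with no dictionary or max-scan; Pre_ excludes negative stall counts n with k >= 2, which are outside the problem's natural domain and on which A's simulation runs on negative gap sizes.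
-- outside the precondition, e.g. on solve(-3, 2): A returns '-1 -2', B returns '0 -1'
import Mathlib
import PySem

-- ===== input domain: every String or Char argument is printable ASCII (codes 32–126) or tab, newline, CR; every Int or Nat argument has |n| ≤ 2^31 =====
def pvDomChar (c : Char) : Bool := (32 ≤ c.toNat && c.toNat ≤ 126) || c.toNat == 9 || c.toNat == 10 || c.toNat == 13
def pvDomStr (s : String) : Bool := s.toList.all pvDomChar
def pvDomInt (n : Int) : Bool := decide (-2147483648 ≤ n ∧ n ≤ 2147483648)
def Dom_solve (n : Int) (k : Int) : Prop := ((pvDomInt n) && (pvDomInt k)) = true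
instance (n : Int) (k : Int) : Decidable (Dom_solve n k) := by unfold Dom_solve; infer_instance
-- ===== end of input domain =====

-- B replaces A's dict-of-gap-counts max-popping simulation by direct arithmetic
-- (largest power of two ≤ k plus one divmod); Pre_ keeps to the problem's natural
-- domain of nonnegative stall counts.

-- ===== PORT A =====
-- literal transliteration of A's while-True loop over the dict l; the fuel
-- k.toNat + 1 merely makes the recursion total (k drops by ≥ 1 each pass, so
-- the fuel is never exhausted; the 0/none fallbacks are unreachable)
def solveLoopA : Nat → PySem.Dict Int Int → Int → String
  | 0, _, _ => ""
  | fuel+1, l, k =>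
    match PySem.List.max? l.keys (fun x => x) with
    | none => ""
    | some m =>
      let rs := PySem.Int.floordiv (m - 1) 2
      let ls := m - 1 - rs
      match l.pop? m with
      | none => ""
      | some (n, l1) =>
        if n ≥ k then
          PySem.Int.toStr (max ls rs) ++ " " ++ PySem.Int.toStr (min ls rs)
        else
          let l2 := [ls, rs].foldl
            (fun (d : PySem.Dict Int Int) item =>
              if d.contains item then d.insert item (d.getD item 0 + n) else d.insert item n) l1
          solveLoopA fuel l2 (k - n)

def solve (n : Int) (k : Int) : String :=
  solveLoopA (k.toNat + 1) (PySem.Dict.ofList [(n, 1)]) k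

-- ===== PORT B =====
-- t = 1; while 2*t <= k: t *= 2   (t doubles, so fuel k.toNat suffices)
def powLoopB : Nat → Int → Int → Int
  | 0, t, _ => t
  | fuel+1, t, k => if 2 * t ≤ k then powLoopB fuel (2 * t) k else t

def solve_alt (n : Int) (k : Int) : String :=
  let m :=
    if k ≤ 1 then n
    else if k > n then 0
    else
      let t := powLoopB k.toNat 1 k
      let q := PySem.Int.floordiv (n - t + 1) t
      let r := PySem.Int.mod (n - t + 1) t
      if k - t + 1 ≤ r then q + 1 else q
  let rs := PySem.Int.floordiv (m - 1) 2
  PySem.Int.toStr (m - 1 - rs) ++ " " ++ PySem.Int.toStr rs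

-- ===== PRECONDITION & SPEC =====
-- Pre_ excludes negative stall counts n with k ≥ 2: they are outside the problem's
-- natural domain, and A's value there (its splitting simulation run on negative gap
-- sizes) is an artefact of floor division on negatives that B does not reproduce.
def Pre_solve (n : Int) (k : Int) : Prop := 2 ≤ k → 0 ≤ n
instance (n : Int) (k : Int) : Decidable (Pre_solve n k) := by unfold Pre_solve; infer_instance

def pvWitness_solve : Int × Int := (5, 2)

def Spec_solve (n : Int) (k : Int) (out : String) : Prop := out = solve_alt n k
instance (n : Int) (k : Int) (out : String) : Decidable (Spec_solve n k out) := by unfold Spec_solve; infer_instance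

-- ===== CLAIM (what is proved, stated in full; the proofs are below) =====
def Claim_equal_solve : Prop := ∀ (n : Int) (k : Int), Dom_solve n k → Pre_solve n k → Spec_solve n k (solve n k)

-- ===== LEMMAS AND PROOFS =====
def mkOutA (m : Int) : String :=
  PySem.Int.toStr (max (m - 1 - PySem.Int.floordiv (m - 1) 2) (PySem.Int.floordiv (m - 1) 2)) ++ " " ++
  PySem.Int.toStr (min (m - 1 - PySem.Int.floordiv (m - 1) 2) (PySem.Int.floordiv (m - 1) 2))

def mkOutB (m : Int) : String :=
  PySem.Int.toStr (m - 1 - PySem.Int.floordiv (m - 1) 2) ++ " " ++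
  PySem.Int.toStr (PySem.Int.floordiv (m - 1) 2)

theorem fmt_eq (m : Int) : mkOutA m = mkOutB m := by
  unfold mkOutA mkOutB
  rw [PySem.Int.floordiv_eq_ediv_of_pos (by norm_num)]
  have h := Int.ediv_add_emod (m - 1) 2
  have h2 := Int.emod_nonneg (m - 1) (by norm_num : (2:Int) ≠ 0)
  rw [max_eq_left (by omega), min_eq_right (by omega)]

def stepState (l : PySem.Dict Int Int) (m c : Int) : PySem.Dict Int Int :=
  [m - 1 - PySem.Int.floordiv (m - 1) 2, PySem.Int.floordiv (m - 1) 2].foldl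
    (fun (d : PySem.Dict Int Int) item =>
      if d.contains item then d.insert item (d.getD item 0 + c) else d.insert item c) (l.erase m)

theorem stepA (f : Nat) (l : PySem.Dict Int Int) (k m c : Int)
    (hmax : PySem.List.max? l.keys (fun x => x) = some m)
    (hget : l.get? m = some c) :
    solveLoopA (f+1) l k =
      if c ≥ k then mkOutA m else solveLoopA f (stepState l m c) (k - c) := by
  simp only [solveLoopA, hmax, PySem.Dict.pop?, hget, Option.map_some]
  rfl

theorem stepState_eq (l : PySem.Dict Int Int) (m c : Int) :
    stepState l m c =
      (let rs := PySem.Int.floordiv (m - 1) 2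
       let ls := m - 1 - rs
       let e := l.erase m
       let d1 := if e.contains ls then e.insert ls (e.getD ls 0 + c) else e.insert ls c
       if d1.contains rs then d1.insert rs (d1.getD rs 0 + c) else d1.insert rs c) := rfl

theorem contains_mk_false (E : List (Int × Int)) (a : Int) (h : ∀ p ∈ E, p.1 ≠ a) :
    (PySem.Dict.mk E).contains a = false := by
  simp only [PySem.Dict.contains, List.any_eq_false]
  intro p hp
  simpa using h p hp

theorem contains_mk_true (E : List (Int × Int)) (a : Int) (v : Int) (h : (a, v) ∈ E) :
    (PySem.Dict.mk E).contains a = true := by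
  simp only [PySem.Dict.contains, List.any_eq_true]
  exact ⟨(a, v), h, by simp⟩

theorem ncontains (d : PySem.Dict Int Int) (a : Int) (h : d.contains a = false) :
    ¬ (d.contains a = true) := by simp [h]

theorem max?_of_mem_of_le (xs : List Int) (m : Int) (hm : m ∈ xs) (hle : ∀ x ∈ xs, x ≤ m) :
    PySem.List.max? xs (fun y => y) = some m := by
  cases xs with
  | nil => cases hm
  | cons x t =>
    rw [PySem.List.max?_id_cons]
    have h1 := PySem.List.le_foldl_max t x
    have h2 := PySem.List.foldl_max_mem t x
    have hMle : t.foldl max x ≤ m := by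
      rcases h2 with h | h
      · rw [h]; exact hle x (List.mem_cons_self ..)
      · exact hle _ (List.mem_cons_of_mem _ h)
    have hmle : m ≤ t.foldl max x := by
      rcases List.mem_cons.mp hm with rfl | h
      · exact h1.1
      · exact h1.2 m h
    exact congrArg some (le_antisymm hMle hmle)

theorem max?_keys_mk (L : List (Int × Int)) (m c : Int) (hm : (m, c) ∈ L)
    (hle : ∀ p ∈ L, p.1 ≤ m) :
    PySem.List.max? (PySem.Dict.mk L).keys (fun x => x) = some m := by
  apply max?_of_mem_of_le
  · rw [PySem.Dict.keys_mk]
    exact List.mem_map_of_mem hm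
  · intro x hx
    rw [PySem.Dict.keys_mk] at hx
    obtain ⟨p, hp, rfl⟩ := List.mem_map.mp hx
    exact hle p hp

theorem insert_fresh (E : List (Int × Int)) (a v : Int) (h : ∀ p ∈ E, p.1 ≠ a) :
    (PySem.Dict.mk E).insert a v = PySem.Dict.mk (E ++ [(a, v)]) :=
  PySem.Dict.ext (PySem.Dict.items_insert_of_not_contains _ _ (contains_mk_false E a h))

theorem insert_merge (E : List (Int × Int)) (a v w : Int) (h : ∀ p ∈ E, p.1 ≠ a) :
    (PySem.Dict.mk (E ++ [(a, v)])).insert a w = PySem.Dict.mk (E ++ [(a, w)]) := by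
  apply PySem.Dict.ext
  rw [PySem.Dict.items_insert_of_contains _ _ (contains_mk_true _ a v (by simp))]
  show List.map _ (E ++ [(a, v)]) = _
  rw [List.map_append]
  congr 1
  · conv_rhs => rw [← List.map_id E]
    apply List.map_congr_left
    intro p hp
    simp only [id]
    rw [if_neg (by simp only [beq_iff_eq]; exact h p hp)]
  · simp

theorem getD_append_last (E : List (Int × Int)) (a v : Int) (h : ∀ p ∈ E, p.1 ≠ a) :
    (PySem.Dict.mk (E ++ [(a, v)])).getD a 0 = v := by
  induction E with
  | nil => simp [PySem.Dict.getD, PySem.Dict.get?_mk_cons]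
  | cons p E ih =>
    have hp := h p (by simp)
    have hcons : (p :: E) ++ [(a, v)] = p :: (E ++ [(a, v)]) := by simp
    rw [hcons]
    simp only [PySem.Dict.getD] at *
    rw [show (PySem.Dict.mk (p :: (E ++ [(a, v)]))).get? a = (PySem.Dict.mk (E ++ [(a, v)])).get? a from by
      rw [PySem.Dict.get?_mk_cons]; simp [hp]]
    exact ih (fun p2 hp2 => h p2 (List.mem_cons_of_mem _ hp2))

theorem erase_head (a v : Int) (rest : List (Int × Int)) (h : ∀ p ∈ rest, p.1 ≠ a) :
    (PySem.Dict.mk ((a, v) :: rest)).erase a = PySem.Dict.mk rest := by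
  apply PySem.Dict.ext
  show List.filter (fun p => !(p.1 == a)) ((a, v) :: rest) = rest
  rw [List.filter_cons]
  simp only [beq_self_eq_true, Bool.not_true, Bool.false_eq_true, if_false]
  exact List.filter_eq_self.mpr (fun p hp => by simp [h p hp])

theorem get?_head (a v : Int) (rest : List (Int × Int)) :
    (PySem.Dict.mk ((a, v) :: rest)).get? a = some v := by
  rw [PySem.Dict.get?_mk_cons]; simp

-- scalar image of the stale-key tail of A's loop, used only by the proofs below
def chainLoopB : Nat → Int → Int → Int → Int
  | 0, m, _, _ => m
  | fuel+1, m, c, k =>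
    if c < k then
      chainLoopB fuel (m - 1 - PySem.Int.floordiv (m - 1) 2)
        (if PySem.Int.mod m 2 ≠ 0 then c + c else c) (k - c)
    else m

theorem chain0 (fuel : Nat) : ∀ (c k : Int), 1 ≤ c → k.toNat + 1 ≤ fuel → chainLoopB fuel 0 c k = 0 := by
  induction fuel with
  | zero => intro c k hc h; omega
  | succ f ih =>
    intro c k hc h
    have h1 : (0:Int) - 1 - PySem.Int.floordiv (0 - 1) 2 = 0 := by decide
    have h2 : ¬ (PySem.Int.mod 0 2 ≠ 0) := by decide
    simp only [chainLoopB, h1, h2, if_false]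
    by_cases hck : c < k
    · rw [if_pos hck]
      exact ih c (k - c) hc (by omega)
    · rw [if_neg hck]

theorem neg_loop (K : Nat) : ∀ (fuelA fuelB : Nat) (L : List (Int × Int)) (m c k : Int),
    m ≤ 0 → 1 ≤ c → (m, c) ∈ L → (L.map Prod.fst).Nodup → (∀ p ∈ L, p.1 ≤ m) →
    k.toNat ≤ K → k.toNat + 1 ≤ fuelA → k.toNat + 1 ≤ fuelB →
    solveLoopA fuelA (PySem.Dict.mk L) k = mkOutB (chainLoopB fuelB m c k) := by
  induction K with
  | zero =>
    intro fuelA fuelB L m c k hm hc hmem hnd hall hK hfA hfB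
    match fuelA, hfA, fuelB, hfB with
    | fA+1, _, fB+1, _ =>
    have hget : (PySem.Dict.mk L).get? m = some c :=
      PySem.Dict.get?_of_mem_items _ hmem (by rw [PySem.Dict.keys_mk]; exact hnd)
    rw [stepA fA _ k m c (max?_keys_mk L m c hmem hall) hget]
    rw [if_pos (show c ≥ k by omega)]
    simp only [chainLoopB, if_neg (show ¬ c < k by omega)]
    exact fmt_eq m
  | succ K ih =>
    intro fuelA fuelB L m c k hm hc hmem hnd hall hK hfA hfB
    match fuelA, hfA, fuelB, hfB with
    | fA+1, hfA, fB+1, hfB =>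
    have hget : (PySem.Dict.mk L).get? m = some c :=
      PySem.Dict.get?_of_mem_items _ hmem (by rw [PySem.Dict.keys_mk]; exact hnd)
    rw [stepA fA _ k m c (max?_keys_mk L m c hmem hall) hget]
    by_cases hk : c ≥ k
    · rw [if_pos hk]
      simp only [chainLoopB, if_neg (show ¬ c < k by omega)]
      exact fmt_eq m
    · rw [if_neg hk]
      simp only [chainLoopB, if_pos (show c < k by omega)]
      have hdiv : PySem.Int.floordiv (m - 1) 2 = (m-1)/2 := PySem.Int.floordiv_eq_ediv_of_pos (by norm_num)
      have hmod : PySem.Int.mod m 2 = m % 2 := PySem.Int.mod_eq_emod_of_pos (by norm_num)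
      have hdm := Int.ediv_add_emod (m-1) 2
      have hdm2 := Int.emod_nonneg (m - 1) (by norm_num : (2:Int) ≠ 0)
      have hdm3 := Int.emod_lt_of_pos (m - 1) (by norm_num : (0:Int) < 2)
      have hm2 := Int.emod_nonneg m (by norm_num : (2:Int) ≠ 0)
      have hm3 := Int.emod_lt_of_pos m (by norm_num : (0:Int) < 2)
      have hm4 := Int.ediv_add_emod m 2
      set rs : Int := PySem.Int.floordiv (m - 1) 2 with hrz
      set ls : Int := m - 1 - rs with hlz
      set E : List (Int × Int) := L.filter (fun p => !(p.1 == m)) with hE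
      have hEmem : ∀ p ∈ E, p.1 < m := by
        intro p hp
        rw [hE, List.mem_filter] at hp
        have := hall p hp.1
        have hne : p.1 ≠ m := by simpa using hp.2
        omega
      have hEnodup : (E.map Prod.fst).Nodup :=
        List.Nodup.sublist (List.Sublist.map Prod.fst (List.filter_sublist (l := L))) hnd
      have hlsm : m ≤ ls ∧ ls ≤ 0 := by omega
      have herase : (PySem.Dict.mk L).erase m = PySem.Dict.mk E := rfl
      have hcls : (PySem.Dict.mk E).contains ls = false :=
        contains_mk_false E ls (fun p hp => by have := hEmem p hp; omega)
      have hd1 : ((PySem.Dict.mk E).insert ls c) = PySem.Dict.mk (E ++ [(ls, c)]) :=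
        PySem.Dict.ext (PySem.Dict.items_insert_of_not_contains _ _ hcls)
      have hndgen : ∀ v : Int, ((E ++ [(ls, v)]).map Prod.fst).Nodup := by
        intro v
        simp only [List.map_append, List.map_cons, List.map_nil]
        rw [List.nodup_append]
        refine ⟨hEnodup, List.nodup_singleton _, ?_⟩
        intro a ha b hb
        obtain ⟨p, hp, rfl⟩ := List.mem_map.mp ha
        have hb2 : b = ls := by simpa using hb
        have := hEmem p hp; omega
      rw [stepState_eq]
      simp only [← hrz, ← hlz, herase, hcls, Bool.false_eq_true, if_false, hd1]
      rcases (show m % 2 = 1 ∨ m % 2 = 0 by omega) with hpar | hpar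
      · -- m odd: rs = ls, the two child inserts merge and double the count
        have hrl : rs = ls := by omega
        have hcon : (PySem.Dict.mk (E ++ [(ls, c)])).contains rs = true := by
          rw [hrl]; exact contains_mk_true _ ls c (by simp)
        have hget2 : (PySem.Dict.mk (E ++ [(ls, c)])).get? ls = some c :=
          PySem.Dict.get?_of_mem_items _ (by simp) (by rw [PySem.Dict.keys_mk]; exact hndgen c)
        have hgd : (PySem.Dict.mk (E ++ [(ls, c)])).getD rs 0 = c := by
          rw [hrl]
          simp [PySem.Dict.getD, hget2]
        have hfin : (PySem.Dict.mk (E ++ [(ls, c)])).insert rs (c + c) = PySem.Dict.mk (E ++ [(ls, c + c)]) := by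
          apply PySem.Dict.ext
          rw [PySem.Dict.items_insert_of_contains _ _ hcon]
          show List.map _ (E ++ [(ls, c)]) = _
          rw [List.map_append]
          congr 1
          · conv_rhs => rw [← List.map_id E]
            apply List.map_congr_left
            intro p hp
            have h1 := hEmem p hp
            simp only [id]
            rw [if_neg (by simp only [beq_iff_eq]; omega)]
          · simp [hrl]
        rw [hcon, if_pos rfl, hgd, hfin]
        rw [if_pos (show PySem.Int.mod m 2 ≠ 0 by rw [hmod]; omega)]
        exact ih fA fB (E ++ [(ls, c + c)]) ls (c + c) (k - c) (by omega) (by omega)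
          (by simp) (hndgen (c + c))
          (by intro p hp
              rcases List.mem_append.mp hp with h | h
              · have := hEmem p h; omega
              · simp at h; simp [h])
          (by omega) (by omega) (by omega)
      · -- m even: rs = ls - 1; it may or may not hit a stale key
        have hrl : rs = ls - 1 := by omega
        rw [if_neg (show ¬ PySem.Int.mod m 2 ≠ 0 by rw [hmod]; omega)]
        by_cases hcrs : (PySem.Dict.mk (E ++ [(ls, c)])).contains rs = true
        · -- rs hits an old stale key: in-place merge, keys unchanged
          rw [hcrs, if_pos rfl]
          set w : Int := (PySem.Dict.mk (E ++ [(ls, c)])).getD rs 0 + c with hw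
          set g : Int × Int → Int × Int := fun p => if (p.1 == rs) = true then (rs, w) else p with hg
          have hkeysg : ∀ p, (g p).1 = p.1 := by
            intro p
            rw [hg]
            by_cases h : p.1 = rs
            · simp [h]
            · simp [h]
          have hfin : (PySem.Dict.mk (E ++ [(ls, c)])).insert rs w = PySem.Dict.mk (E.map g ++ [(ls, c)]) := by
            apply PySem.Dict.ext
            rw [PySem.Dict.items_insert_of_contains _ _ hcrs]
            show List.map g (E ++ [(ls, c)]) = _
            rw [List.map_append]
            congr 1
            simp only [List.map_cons, List.map_nil, hg]
            rw [if_neg (by simp only [beq_iff_eq]; omega)]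
          rw [hfin]
          have hkeq : (E.map g).map Prod.fst = E.map Prod.fst := by
            rw [List.map_map]
            exact List.map_congr_left (fun p _ => hkeysg p)
          have hmemE : ∀ p ∈ E.map g, p.1 < m := by
            intro p hp
            obtain ⟨p0, hp0, rfl⟩ := List.mem_map.mp hp
            rw [hkeysg]
            exact hEmem p0 hp0
          have hndm : ((E.map g ++ [(ls, c)]).map Prod.fst).Nodup := by
            have heq : ((E.map g ++ [(ls, c)]).map Prod.fst) = ((E ++ [(ls, c)]).map Prod.fst) := by
              simp only [List.map_append]
              rw [hkeq]
            rw [heq]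
            exact hndgen c
          exact ih fA fB (E.map g ++ [(ls, c)]) ls c (k - c) (by omega) hc
            (by simp) hndm
            (by intro p hp
                rcases List.mem_append.mp hp with h | h
                · have := hmemE p h; omega
                · simp at h; simp [h])
            (by omega) (by omega) (by omega)
        · -- rs is a fresh key: it is appended
          have hcrs' : (PySem.Dict.mk (E ++ [(ls, c)])).contains rs = false := by
            revert hcrs; cases h : (PySem.Dict.mk (E ++ [(ls, c)])).contains rs <;> simp
          rw [hcrs']
          simp only [Bool.false_eq_true, if_false]
          have hfin : (PySem.Dict.mk (E ++ [(ls, c)])).insert rs c = PySem.Dict.mk ((E ++ [(ls, c)]) ++ [(rs, c)]) := by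
            apply PySem.Dict.ext
            rw [PySem.Dict.items_insert_of_not_contains _ _ hcrs']
          rw [hfin]
          have hnotin : ∀ p ∈ E ++ [(ls, c)], p.1 ≠ rs := by
            have h2 := hcrs'
            simp only [PySem.Dict.contains, List.any_eq_false] at h2
            intro p hp h
            have := h2 p hp
            simp [h] at this
          have hndf : ((((E ++ [(ls, c)]) ++ [(rs, c)])).map Prod.fst).Nodup := by
            simp only [List.map_append, List.map_cons, List.map_nil]
            rw [List.nodup_append]
            refine ⟨by simpa using hndgen c, List.nodup_singleton _, ?_⟩
            intro a ha b hb
            have hb2 : b = rs := by simpa using hb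
            subst hb2
            rcases List.mem_append.mp ha with h | h
            · obtain ⟨p, hp, rfl⟩ := List.mem_map.mp h
              exact fun he => hnotin p (List.mem_append_left _ hp) he
            · have h2 : a = ls := by simpa using h
              omega
          exact ih fA fB ((E ++ [(ls, c)]) ++ [(rs, c)]) ls c (k - c) (by omega) hc
            (by simp) hndf
            (by intro p hp
                rcases List.mem_append.mp hp with h | h
                · rcases List.mem_append.mp h with h2 | h2
                  · have := hEmem p h2; omega
                  · simp at h2; simp [h2]
                · simp at h; simp [h]; omega)
            (by omega) (by omega) (by omega)

def REF (t q r k : Int) : String :=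
  if h : 1 ≤ q ∧ 1 ≤ t ∧ t < k then
    if q = 1 then (if k ≤ t + r then mkOutB 1 else "0 -1")
    else if q = 2 then (if k ≤ 2*t + r then mkOutB 1 else "0 -1")
    else REF (2*t) (PySem.Int.floordiv (q*t + r - t) (2*t)) (PySem.Int.mod (q*t + r - t) (2*t)) (k - t)
  else
    if k ≤ r then mkOutB (q + 1) else if k ≤ t then mkOutB q
    else if q = 1 then (if k ≤ t + r then mkOutB 1 else "0 -1")
    else if q = 2 then (if k ≤ 2*t + r then mkOutB 1 else "0 -1")
    else "0 -1"
termination_by (k - t).toNat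
decreasing_by
  omega

-- dispatch of a tail state [(0, C)] (possibly followed by further stale keys handled by neg_loop)

theorem tail0 (fuel : Nat) (C k : Int) (hC : 1 ≤ C) (hf : k.toNat + 1 ≤ fuel) :
    solveLoopA fuel (PySem.Dict.mk [(0, C)]) k = "0 -1" := by
  have h := neg_loop k.toNat fuel (k.toNat + 1) [(0, C)] 0 C k (by omega) hC (by simp)
    (by simp) (by intro p hp; simp at hp; simp [hp]) (by omega) hf (by omega)
  rw [h, chain0 _ C k hC (by omega)]
  decide

theorem REF_le_r (t q r k : Int) (hk : 1 ≤ k) (hkr : k ≤ r) (hrt : r < t) : REF t q r k = mkOutB (q+1) := by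
  rw [REF]
  rw [dif_neg (by omega)]
  rw [if_pos hkr]

theorem REF_le_t (t q r k : Int) (hrk : r < k) (hkt : k ≤ t) : REF t q r k = mkOutB q := by
  rw [REF]
  rw [dif_neg (by omega)]
  rw [if_neg (by omega), if_pos hkt]

theorem REF_q1 (t r k : Int) (h1 : 1 ≤ t) (hr0 : 0 ≤ r) (hrk : r < k) :
    REF t 1 r k = (if k ≤ t + r then mkOutB 1 else "0 -1") := by
  rw [REF]
  by_cases h : t < k
  · rw [dif_pos (by omega), if_pos rfl]
  · rw [dif_neg (by omega), if_neg (by omega), if_pos (by omega), if_pos (by omega)]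

theorem REF_q2 (t r k : Int) (h1 : 1 ≤ t) (hkt : t < k) :
    REF t 2 r k = (if k ≤ 2*t + r then mkOutB 1 else "0 -1") := by
  rw [REF]
  rw [dif_pos (by omega), if_neg (by omega), if_pos rfl]

theorem REF_rec (t q r k : Int) (hq : 3 ≤ q) (h1 : 1 ≤ t) (hkt : t < k) :
    REF t q r k = REF (2*t) (PySem.Int.floordiv (q*t + r - t) (2*t)) (PySem.Int.mod (q*t + r - t) (2*t)) (k - t) := by
  rw [REF]
  rw [dif_pos (by omega), if_neg (by omega), if_neg (by omega)]

theorem fdiv_layer (t x e : Int) (h1 : 1 ≤ t) (hlo : e * (2*t) ≤ x) (hhi : x < (e+1) * (2*t)) :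
    PySem.Int.floordiv x (2*t) = e ∧ PySem.Int.mod x (2*t) = x - e * (2*t) := by
  have hd : PySem.Int.floordiv x (2*t) = e :=
    (PySem.Int.floordiv_eq_iff_of_pos (by omega)).mpr ⟨hlo, hhi⟩
  have hm := PySem.Int.floordiv_mul_add_mod x (2*t)
  rw [hd] at hm
  exact ⟨hd, by omega⟩

theorem pos_loop (K : Nat) : ∀ (fuel : Nat) (t q r k : Int),
    1 ≤ t → 0 ≤ r → r < t → 1 ≤ q → 1 ≤ k →
    k.toNat ≤ K → k.toNat + 1 ≤ fuel →
    solveLoopA fuel (PySem.Dict.mk (if r = 0 then [(q, t)] else [(q+1, r), (q, t - r)])) k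
      = REF t q r k := by
  induction K with
  | zero => intro fuel t q r k ht hr0 hrt hq hk hK hf; omega
  | succ K ih =>
    intro fuel t q r k ht hr0 hrt hq hk hK hf
    match fuel, hf with
    | fA+1, hf =>
    by_cases hr : r = 0
    · -- layer start [(q, t)]
      subst hr
      rw [if_pos rfl]
      have hmax : PySem.List.max? (PySem.Dict.mk [(q, t)]).keys (fun x => x) = some q :=
        max?_keys_mk _ q t (by simp) (by intro p hp; simp at hp; simp [hp])
      rw [stepA fA _ k q t hmax (get?_head q t [])]
      by_cases hret : t ≥ k
      · rw [if_pos hret, REF_le_t t q 0 k (by omega) (by omega)]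
        exact fmt_eq q
      · rw [if_neg hret]
        have herase : (PySem.Dict.mk [(q, t)]).erase q = PySem.Dict.mk [] :=
          erase_head q t [] (by simp)
        rcases (show q = 1 ∨ q = 2 ∨ (3 ≤ q ∧ q % 2 = 1) ∨ (4 ≤ q ∧ q % 2 = 0) by omega)
          with hq1 | hq2 | ⟨hq3, hodd⟩ | ⟨hq4, heven⟩
        · -- q = 1 : children 0,0 → [(0, 2t)] → tail
          subst hq1
          have hs : stepState (PySem.Dict.mk [((1:Int), t)]) 1 t = PySem.Dict.mk [(0, t + t)] := by
            rw [stepState_eq]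
            have hrv : PySem.Int.floordiv ((1:Int) - 1) 2 = 0 := by decide
            simp only [herase, hrv]
            norm_num
            rw [insert_fresh [] 0 t (by simp)]
            rw [insert_merge [] 0 t (t + t) (by simp)]
            rfl
          rw [hs, tail0 fA (t + t) (k - t) (by omega) (by omega)]
          rw [REF_q1 t 0 k (by omega) (by omega) (by omega), if_neg (by omega)]
        · -- q = 2 : children 1,0 → [(1,t),(0,t)] → second pop
          subst hq2
          have hs : stepState (PySem.Dict.mk [((2:Int), t)]) 2 t = PySem.Dict.mk [(1, t), (0, t)] := by
            rw [stepState_eq]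
            have hrv : PySem.Int.floordiv ((2:Int) - 1) 2 = 0 := by decide
            simp only [herase, hrv]
            norm_num
            rw [insert_fresh [] 1 t (by simp)]
            rw [if_neg (ncontains _ _ (contains_mk_false ([] ++ [((1:Int), t)]) 0
              (by intro p hp; simp at hp; subst hp; show (1:Int) ≠ 0; omega)))]
            rw [insert_fresh ([] ++ [((1:Int), t)]) 0 t
              (by intro p hp; simp at hp; subst hp; show (1:Int) ≠ 0; omega)]
            rfl
          rw [hs]
          match fA, (show 1 ≤ fA by omega) with
          | fA2+1, _ =>
          have hmax2 : PySem.List.max? (PySem.Dict.mk [((1:Int), t), (0, t)]).keys (fun x => x) = some 1 :=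
            max?_keys_mk _ 1 t (by simp) (by intro p hp; simp at hp; rcases hp with h | h <;> simp [h])
          rw [stepA fA2 _ (k - t) 1 t hmax2 (get?_head 1 t [(0, t)])]
          by_cases hret2 : t ≥ k - t
          · rw [if_pos hret2, REF_q2 t 0 k (by omega) (by omega), if_pos (by omega)]
            exact fmt_eq 1
          · rw [if_neg hret2]
            have herase2 : (PySem.Dict.mk [((1:Int), t), (0, t)]).erase 1 = PySem.Dict.mk [(0, t)] :=
              erase_head 1 t [(0, t)] (by intro p hp; simp at hp; simp [hp])
            have hs2 : stepState (PySem.Dict.mk [((1:Int), t), (0, t)]) 1 t = PySem.Dict.mk [(0, t + t + t)] := by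
              rw [stepState_eq]
              have hrv : PySem.Int.floordiv ((1:Int) - 1) 2 = 0 := by decide
              simp only [herase2, hrv]
              norm_num
              rw [show [((0:Int), t)] = [] ++ [((0:Int), t)] from rfl]
              rw [getD_append_last [] 0 t (by simp)]
              rw [insert_merge [] 0 t (t + t) (by simp)]
              rw [insert_merge [] 0 (t + t) (t + t + t) (by simp)]
              rfl
            rw [hs2, tail0 fA2 (t + t + t) (k - t - t) (by omega) (by omega)]
            rw [REF_q2 t 0 k (by omega) (by omega), if_neg (by omega)]
        · -- q ≥ 3 odd : children j,j merge → [(j, 2t)] = layer (2t) j 0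
          obtain ⟨j, rfl⟩ : ∃ j, q = 2*j + 1 := ⟨(q-1)/2, by omega⟩
          have hs : stepState (PySem.Dict.mk [((2*j+1 : Int), t)]) (2*j+1) t = PySem.Dict.mk [(j, t + t)] := by
            rw [stepState_eq]
            have hrv : PySem.Int.floordiv ((2*j+1 : Int) - 1) 2 = j := by
              rw [PySem.Int.floordiv_eq_ediv_of_pos (by norm_num)]; omega
            simp only [herase, hrv]
            have hlv : (2*j+1 : Int) - 1 - j = j := by omega
            rw [hlv]
            rw [if_neg (ncontains _ _ (contains_mk_false [] j (by simp)))]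
            rw [insert_fresh [] j t (by simp)]
            simp only [List.nil_append]
            rw [if_pos (contains_mk_true [((j:Int), t)] j t (by simp))]
            rw [show [((j:Int), t)] = [] ++ [((j:Int), t)] from rfl]
            rw [getD_append_last [] j t (by simp)]
            rw [insert_merge [] j t (t + t) (by simp)]
            rfl
          rw [hs]
          have harith := fdiv_layer t ((2*j+1)*t + 0 - t) j ht (by nlinarith) (by nlinarith)
          rw [REF_rec t (2*j+1) 0 k (by omega) ht (by omega), harith.1,
            (show PySem.Int.mod ((2*j+1)*t + 0 - t) (2*t) = 0 from by rw [harith.2]; ring)]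
          have := ih fA (2*t) j 0 (k - t) (by omega) (by omega) (by omega) (by omega)
            (by omega) (by omega) (by omega)
          rw [if_pos rfl] at this
          rw [show (t + t : Int) = 2*t from by ring] at hs ⊢
          exact this
        · -- q ≥ 4 even : children j+1, j → [(j+1, t), (j, t)] = layer (2t) j t
          obtain ⟨j, rfl⟩ : ∃ j, q = 2*j + 2 := ⟨(q-2)/2, by omega⟩
          have hs : stepState (PySem.Dict.mk [((2*j+2 : Int), t)]) (2*j+2) t
              = PySem.Dict.mk [(j+1, t), (j, t)] := by
            rw [stepState_eq]
            have hrv : PySem.Int.floordiv ((2*j+2 : Int) - 1) 2 = j := by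
              rw [PySem.Int.floordiv_eq_ediv_of_pos (by norm_num)]; omega
            simp only [herase, hrv]
            have hlv : (2*j+2 : Int) - 1 - j = j + 1 := by omega
            rw [hlv]
            rw [if_neg (ncontains _ _ (contains_mk_false [] (j+1) (by simp)))]
            rw [insert_fresh [] (j+1) t (by simp)]
            simp only [List.nil_append]
            rw [if_neg (ncontains _ _ (contains_mk_false [((j+1 : Int), t)] j
              (by intro p hp; simp at hp; subst hp; show j + 1 ≠ j; omega)))]
            rw [insert_fresh [(j+1, t)] j t (by intro p hp; simp at hp; subst hp; show j + 1 ≠ j; omega)]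
            rfl
          rw [hs]
          have harith := fdiv_layer t ((2*j+2)*t + 0 - t) j ht (by nlinarith) (by nlinarith)
          rw [REF_rec t (2*j+2) 0 k (by omega) ht (by omega), harith.1,
            (show PySem.Int.mod ((2*j+2)*t + 0 - t) (2*t) = t from by rw [harith.2]; ring)]
          have := ih fA (2*t) j t (k - t) (by omega) (by omega) (by omega) (by omega)
            (by omega) (by omega) (by omega)
          rw [if_neg (by omega)] at this
          rw [show (2*t - t : Int) = t from by ring] at this
          exact this
    · -- layer start [(q+1, r), (q, t-r)] with r > 0
      rw [if_neg hr]
      have ht2 : 2 ≤ t := by omega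
      have hmax : PySem.List.max? (PySem.Dict.mk [(q+1, r), (q, t - r)]).keys (fun x => x) = some (q+1) :=
        max?_keys_mk _ (q+1) r (by simp) (by intro p hp; simp at hp; rcases hp with h | h <;> simp [h] <;> omega)
      rw [stepA fA _ k (q+1) r hmax (get?_head (q+1) r [(q, t - r)])]
      by_cases hret : r ≥ k
      · rw [if_pos hret, REF_le_r t q r k (by omega) (by omega) (by omega)]
        exact fmt_eq (q+1)
      · rw [if_neg hret]
        have herase : (PySem.Dict.mk [(q+1, r), (q, t - r)]).erase (q+1) = PySem.Dict.mk [(q, t - r)] :=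
          erase_head (q+1) r [(q, t - r)] (by intro p hp; simp at hp; subst hp; show q ≠ q + 1; omega)
        rcases (show q = 1 ∨ q = 2 ∨ (3 ≤ q ∧ q % 2 = 1) ∨ (4 ≤ q ∧ q % 2 = 0) by omega)
          with hq1 | hq2 | ⟨hq3, hodd⟩ | ⟨hq4, heven⟩
        · -- q = 1 : children of 2 are 1, 0; the 1 merges into the layer rest
          subst hq1
          norm_num
          have hs : stepState (PySem.Dict.mk [((2:Int), r), (1, t - r)]) 2 r
              = PySem.Dict.mk [(1, t), (0, r)] := by
            rw [stepState_eq]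
            have hrv : PySem.Int.floordiv ((2:Int) - 1) 2 = 0 := by decide
            rw [show (PySem.Dict.mk [((2:Int), r), (1, t - r)]).erase 2 = PySem.Dict.mk [(1, t - r)] from
              erase_head 2 r [(1, t - r)] (by intro p hp; simp at hp; subst hp; show (1:Int) ≠ 2; omega)]
            simp only [hrv]
            norm_num
            rw [show [((1:Int), t - r)] = [] ++ [((1:Int), t - r)] from rfl]
            rw [getD_append_last [] 1 (t - r) (by simp)]
            rw [insert_merge [] 1 (t - r) (t - r + r) (by simp)]
            rw [if_neg (ncontains _ _ (contains_mk_false ([] ++ [((1:Int), t - r + r)]) 0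
              (by intro p hp; simp at hp; subst hp; show (1:Int) ≠ 0; omega)))]
            rw [insert_fresh ([] ++ [((1:Int), t - r + r)]) 0 r
              (by intro p hp; simp at hp; subst hp; show (1:Int) ≠ 0; omega)]
            rw [show (t - r + r : Int) = t from by ring]
            rfl
          rw [hs]
          match fA, (show 1 ≤ fA by omega) with
          | fA2+1, _ =>
          have hmax2 : PySem.List.max? (PySem.Dict.mk [((1:Int), t), (0, r)]).keys (fun x => x) = some 1 :=
            max?_keys_mk _ 1 t (by simp) (by intro p hp; simp at hp; rcases hp with h | h <;> simp [h])
          rw [stepA fA2 _ (k - r) 1 t hmax2 (get?_head 1 t [(0, r)])]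
          by_cases hret2 : t ≥ k - r
          · rw [if_pos hret2, REF_q1 t r k (by omega) (by omega) (by omega), if_pos (by omega)]
            exact fmt_eq 1
          · rw [if_neg hret2]
            have herase2 : (PySem.Dict.mk [((1:Int), t), (0, r)]).erase 1 = PySem.Dict.mk [(0, r)] :=
              erase_head 1 t [(0, r)] (by intro p hp; simp at hp; subst hp; show (0:Int) ≠ 1; omega)
            have hs2 : stepState (PySem.Dict.mk [((1:Int), t), (0, r)]) 1 t
                = PySem.Dict.mk [(0, r + t + t)] := by
              rw [stepState_eq]
              have hrv : PySem.Int.floordiv ((1:Int) - 1) 2 = 0 := by decide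
              simp only [herase2, hrv]
              norm_num
              rw [show [((0:Int), r)] = [] ++ [((0:Int), r)] from rfl]
              rw [getD_append_last [] 0 r (by simp)]
              rw [insert_merge [] 0 r (r + t) (by simp)]
              rw [insert_merge [] 0 (r + t) (r + t + t) (by simp)]
              rfl
            rw [hs2, tail0 fA2 (r + t + t) (k - r - t) (by omega) (by omega)]
            rw [REF_q1 t r k (by omega) (by omega) (by omega), if_neg (by omega)]
        · -- q = 2 : children of 3 are 1, 1
          subst hq2
          norm_num
          have hs : stepState (PySem.Dict.mk [((3:Int), r), (2, t - r)]) 3 r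
              = PySem.Dict.mk [(2, t - r), (1, r + r)] := by
            rw [stepState_eq]
            have hrv : PySem.Int.floordiv ((3:Int) - 1) 2 = 1 := by decide
            rw [show (PySem.Dict.mk [((3:Int), r), (2, t - r)]).erase 3 = PySem.Dict.mk [(2, t - r)] from
              erase_head 3 r [(2, t - r)] (by intro p hp; simp at hp; subst hp; show (2:Int) ≠ 3; omega)]
            simp only [hrv]
            norm_num
            rw [insert_fresh [((2:Int), t - r)] 1 r
              (by intro p hp; simp at hp; subst hp; show (2:Int) ≠ 1; omega)]
            rw [insert_merge [((2:Int), t - r)] 1 r (r + r)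
              (by intro p hp; simp at hp; subst hp; show (2:Int) ≠ 1; omega)]
            rfl
          rw [hs]
          match fA, (show 1 ≤ fA by omega) with
          | fA2+1, _ =>
          have hmax2 : PySem.List.max? (PySem.Dict.mk [((2:Int), t - r), (1, r + r)]).keys (fun x => x) = some 2 :=
            max?_keys_mk _ 2 (t - r) (by simp) (by intro p hp; simp at hp; rcases hp with h | h <;> simp [h] <;> omega)
          rw [stepA fA2 _ (k - r) 2 (t - r) hmax2 (get?_head 2 (t - r) [(1, r + r)])]
          by_cases hret2 : t - r ≥ k - r
          · rw [if_pos hret2, REF_le_t t 2 r k (by omega) (by omega)]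
            exact fmt_eq 2
          · rw [if_neg hret2]
            have herase2 : (PySem.Dict.mk [((2:Int), t - r), (1, r + r)]).erase 2 = PySem.Dict.mk [(1, r + r)] :=
              erase_head 2 (t - r) [(1, r + r)] (by intro p hp; simp at hp; subst hp; show (1:Int) ≠ 2; omega)
            have hs2 : stepState (PySem.Dict.mk [((2:Int), t - r), (1, r + r)]) 2 (t - r)
                = PySem.Dict.mk [(1, t + r), (0, t - r)] := by
              rw [stepState_eq]
              have hrv : PySem.Int.floordiv ((2:Int) - 1) 2 = 0 := by decide
              simp only [herase2, hrv]
              norm_num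
              rw [show [((1:Int), r + r)] = [] ++ [((1:Int), r + r)] from rfl]
              rw [getD_append_last [] 1 (r + r) (by simp)]
              rw [insert_merge [] 1 (r + r) (r + r + (t - r)) (by simp)]
              rw [if_neg (ncontains _ _ (contains_mk_false ([] ++ [((1:Int), r + r + (t - r))]) 0
                (by intro p hp; simp at hp; subst hp; show (1:Int) ≠ 0; omega)))]
              rw [insert_fresh ([] ++ [((1:Int), r + r + (t - r))]) 0 (t - r)
                (by intro p hp; simp at hp; subst hp; show (1:Int) ≠ 0; omega)]
              rw [show (r + r + (t - r) : Int) = t + r from by ring]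
              rfl
            rw [hs2]
            match fA2, (show 1 ≤ fA2 by omega) with
            | fA3+1, _ =>
            have hmax3 : PySem.List.max? (PySem.Dict.mk [((1:Int), t + r), (0, t - r)]).keys (fun x => x) = some 1 :=
              max?_keys_mk _ 1 (t + r) (by simp) (by intro p hp; simp at hp; rcases hp with h | h <;> simp [h])
            rw [stepA fA3 _ (k - r - (t - r)) 1 (t + r) hmax3 (get?_head 1 (t + r) [(0, t - r)])]
            by_cases hret3 : t + r ≥ k - r - (t - r)
            · rw [if_pos hret3, REF_q2 t r k (by omega) (by omega), if_pos (by omega)]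
              exact fmt_eq 1
            · rw [if_neg hret3]
              have herase3 : (PySem.Dict.mk [((1:Int), t + r), (0, t - r)]).erase 1 = PySem.Dict.mk [(0, t - r)] :=
                erase_head 1 (t + r) [(0, t - r)] (by intro p hp; simp at hp; subst hp; show (0:Int) ≠ 1; omega)
              have hs3 : stepState (PySem.Dict.mk [((1:Int), t + r), (0, t - r)]) 1 (t + r)
                  = PySem.Dict.mk [(0, t + t + (t + r))] := by
                rw [stepState_eq]
                have hrv : PySem.Int.floordiv ((1:Int) - 1) 2 = 0 := by decide
                simp only [herase3, hrv]
                norm_num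
                rw [show [((0:Int), t - r)] = [] ++ [((0:Int), t - r)] from rfl]
                rw [getD_append_last [] 0 (t - r) (by simp)]
                rw [insert_merge [] 0 (t - r) (t - r + (t + r)) (by simp)]
                rw [insert_merge [] 0 (t - r + (t + r)) (t - r + (t + r) + (t + r)) (by simp)]
                rw [show (t - r + (t + r) + (t + r) : Int) = t + t + (t + r) from by ring]
                rfl
              rw [hs3, tail0 fA3 (t + t + (t + r)) (k - r - (t - r) - (t + r)) (by omega) (by omega)]
              rw [REF_q2 t r k (by omega) (by omega), if_neg (by omega)]
        · -- q ≥ 3 odd : q = 2j+1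
          obtain ⟨j, rfl⟩ : ∃ j, q = 2*j + 1 := ⟨(q-1)/2, by omega⟩
          have hj : 1 ≤ j := by omega
          have hs : stepState (PySem.Dict.mk [((2*j+1 : Int) + 1, r), (2*j+1, t - r)]) (2*j+1+1) r
              = PySem.Dict.mk [(2*j+1, t - r), (j+1, r), (j, r)] := by
            rw [stepState_eq]
            have hrv : PySem.Int.floordiv ((2*j+1 : Int) + 1 - 1) 2 = j := by
              rw [PySem.Int.floordiv_eq_ediv_of_pos (by norm_num)]; omega
            simp only [herase, hrv]
            have hlv : (2*j+1 : Int) + 1 - 1 - j = j + 1 := by omega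
            rw [hlv]
            rw [if_neg (ncontains _ _ (contains_mk_false [((2*j+1 : Int), t - r)] (j+1)
              (by intro p hp; simp at hp; subst hp; show (2*j+1 : Int) ≠ j + 1; omega)))]
            rw [insert_fresh [((2*j+1 : Int), t - r)] (j+1) r
              (by intro p hp; simp at hp; subst hp; show (2*j+1 : Int) ≠ j + 1; omega)]
            rw [if_neg (ncontains _ _ (contains_mk_false ([((2*j+1 : Int), t - r)] ++ [(j+1, r)]) j
              (by intro p hp; simp at hp; rcases hp with h | h <;> subst h <;> simp <;> omega)))]
            rw [insert_fresh ([((2*j+1 : Int), t - r)] ++ [(j+1, r)]) j r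
              (by intro p hp; simp at hp; rcases hp with h | h <;> subst h <;> simp <;> omega)]
            rfl
          rw [hs]
          match fA, (show 1 ≤ fA by omega) with
          | fA2+1, _ =>
          have hmax2 : PySem.List.max? (PySem.Dict.mk [((2*j+1 : Int), t - r), (j+1, r), (j, r)]).keys
              (fun x => x) = some (2*j+1) :=
            max?_keys_mk _ (2*j+1) (t - r) (by simp)
              (by intro p hp; simp at hp; rcases hp with h | h | h <;> simp [h] <;> omega)
          rw [stepA fA2 _ (k - r) (2*j+1) (t - r) hmax2 (get?_head (2*j+1) (t - r) [(j+1, r), (j, r)])]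
          by_cases hret2 : t - r ≥ k - r
          · rw [if_pos hret2, REF_le_t t (2*j+1) r k (by omega) (by omega)]
            exact fmt_eq (2*j+1)
          · rw [if_neg hret2]
            have herase2 : (PySem.Dict.mk [((2*j+1 : Int), t - r), (j+1, r), (j, r)]).erase (2*j+1)
                = PySem.Dict.mk [(j+1, r), (j, r)] :=
              erase_head (2*j+1) (t - r) [(j+1, r), (j, r)]
                (by intro p hp; simp at hp; rcases hp with h | h <;> subst h <;> simp <;> omega)
            have hs2 : stepState (PySem.Dict.mk [((2*j+1 : Int), t - r), (j+1, r), (j, r)]) (2*j+1) (t - r)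
                = PySem.Dict.mk [(j+1, r), (j, r + (t - r) + (t - r))] := by
              rw [stepState_eq]
              have hrv : PySem.Int.floordiv ((2*j+1 : Int) - 1) 2 = j := by
                rw [PySem.Int.floordiv_eq_ediv_of_pos (by norm_num)]; omega
              simp only [herase2, hrv]
              have hlv : (2*j+1 : Int) - 1 - j = j := by omega
              rw [hlv]
              rw [show [((j+1 : Int), r), (j, r)] = [((j+1 : Int), r)] ++ [(j, r)] from rfl]
              rw [if_pos (contains_mk_true ([((j+1 : Int), r)] ++ [(j, r)]) j r (by simp))]
              rw [getD_append_last [((j+1 : Int), r)] j r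
                (by intro p hp; simp at hp; subst hp; show (j+1 : Int) ≠ j; omega)]
              rw [insert_merge [((j+1 : Int), r)] j r (r + (t - r))
                (by intro p hp; simp at hp; subst hp; show (j+1 : Int) ≠ j; omega)]
              rw [if_pos (contains_mk_true ([((j+1 : Int), r)] ++ [(j, r + (t - r))]) j (r + (t - r)) (by simp))]
              rw [getD_append_last [((j+1 : Int), r)] j (r + (t - r))
                (by intro p hp; simp at hp; subst hp; show (j+1 : Int) ≠ j; omega)]
              rw [insert_merge [((j+1 : Int), r)] j (r + (t - r)) (r + (t - r) + (t - r))
                (by intro p hp; simp at hp; subst hp; show (j+1 : Int) ≠ j; omega)]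
              rfl
            rw [hs2]
            have harith := fdiv_layer t ((2*j+1)*t + r - t) j ht (by nlinarith) (by nlinarith)
            rw [REF_rec t (2*j+1) r k (by omega) ht (by omega), harith.1,
              (show PySem.Int.mod ((2*j+1)*t + r - t) (2*t) = r from by rw [harith.2]; ring)]
            have := ih fA2 (2*t) j r (k - t) (by omega) (by omega) (by omega) (by omega)
              (by omega) (by omega) (by omega)
            rw [if_neg (by omega)] at this
            rw [show (r + (t - r) + (t - r) : Int) = 2*t - r from by ring]
            rw [show (k - r - (t - r) : Int) = k - t from by ring]
            exact this
        · -- q ≥ 4 even : q = 2j+2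
          obtain ⟨j, rfl⟩ : ∃ j, q = 2*j + 2 := ⟨(q-2)/2, by omega⟩
          have hj : 1 ≤ j := by omega
          have hs : stepState (PySem.Dict.mk [((2*j+2 : Int) + 1, r), (2*j+2, t - r)]) (2*j+2+1) r
              = PySem.Dict.mk [(2*j+2, t - r), (j+1, r + r)] := by
            rw [stepState_eq]
            have hrv : PySem.Int.floordiv ((2*j+2 : Int) + 1 - 1) 2 = j + 1 := by
              rw [PySem.Int.floordiv_eq_ediv_of_pos (by norm_num)]; omega
            simp only [herase, hrv]
            have hlv : (2*j+2 : Int) + 1 - 1 - (j + 1) = j + 1 := by omega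
            rw [hlv]
            rw [if_neg (ncontains _ _ (contains_mk_false [((2*j+2 : Int), t - r)] (j+1)
              (by intro p hp; simp at hp; subst hp; show (2*j+2 : Int) ≠ j + 1; omega)))]
            rw [insert_fresh [((2*j+2 : Int), t - r)] (j+1) r
              (by intro p hp; simp at hp; subst hp; show (2*j+2 : Int) ≠ j + 1; omega)]
            rw [if_pos (contains_mk_true ([((2*j+2 : Int), t - r)] ++ [(j+1, r)]) (j+1) r (by simp))]
            rw [getD_append_last [((2*j+2 : Int), t - r)] (j+1) r
              (by intro p hp; simp at hp; subst hp; show (2*j+2 : Int) ≠ j + 1; omega)]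
            rw [insert_merge [((2*j+2 : Int), t - r)] (j+1) r (r + r)
              (by intro p hp; simp at hp; subst hp; show (2*j+2 : Int) ≠ j + 1; omega)]
            rfl
          rw [hs]
          match fA, (show 1 ≤ fA by omega) with
          | fA2+1, _ =>
          have hmax2 : PySem.List.max? (PySem.Dict.mk [((2*j+2 : Int), t - r), (j+1, r + r)]).keys
              (fun x => x) = some (2*j+2) :=
            max?_keys_mk _ (2*j+2) (t - r) (by simp)
              (by intro p hp; simp at hp; rcases hp with h | h <;> simp [h] <;> omega)
          rw [stepA fA2 _ (k - r) (2*j+2) (t - r) hmax2 (get?_head (2*j+2) (t - r) [(j+1, r + r)])]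
          by_cases hret2 : t - r ≥ k - r
          · rw [if_pos hret2, REF_le_t t (2*j+2) r k (by omega) (by omega)]
            exact fmt_eq (2*j+2)
          · rw [if_neg hret2]
            have herase2 : (PySem.Dict.mk [((2*j+2 : Int), t - r), (j+1, r + r)]).erase (2*j+2)
                = PySem.Dict.mk [(j+1, r + r)] :=
              erase_head (2*j+2) (t - r) [(j+1, r + r)]
                (by intro p hp; simp at hp; subst hp; show (j+1 : Int) ≠ 2*j+2; omega)
            have hs2 : stepState (PySem.Dict.mk [((2*j+2 : Int), t - r), (j+1, r + r)]) (2*j+2) (t - r)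
                = PySem.Dict.mk [(j+1, r + r + (t - r)), (j, t - r)] := by
              rw [stepState_eq]
              have hrv : PySem.Int.floordiv ((2*j+2 : Int) - 1) 2 = j := by
                rw [PySem.Int.floordiv_eq_ediv_of_pos (by norm_num)]; omega
              simp only [herase2, hrv]
              have hlv : (2*j+2 : Int) - 1 - j = j + 1 := by omega
              rw [hlv]
              rw [show [((j+1 : Int), r + r)] = [] ++ [((j+1 : Int), r + r)] from rfl]
              rw [if_pos (contains_mk_true ([] ++ [((j+1 : Int), r + r)]) (j+1) (r + r) (by simp))]
              rw [getD_append_last [] (j+1) (r + r) (by simp)]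
              rw [insert_merge [] (j+1) (r + r) (r + r + (t - r)) (by simp)]
              rw [if_neg (ncontains _ _ (contains_mk_false ([] ++ [((j+1 : Int), r + r + (t - r))]) j
                (by intro p hp; simp at hp; subst hp; show (j+1 : Int) ≠ j; omega)))]
              rw [insert_fresh ([] ++ [((j+1 : Int), r + r + (t - r))]) j (t - r)
                (by intro p hp; simp at hp; subst hp; show (j+1 : Int) ≠ j; omega)]
              rfl
            rw [hs2]
            have harith := fdiv_layer t ((2*j+2)*t + r - t) j ht (by nlinarith) (by nlinarith)
            rw [REF_rec t (2*j+2) r k (by omega) ht (by omega), harith.1,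
              (show PySem.Int.mod ((2*j+2)*t + r - t) (2*t) = t + r from by rw [harith.2]; ring)]
            have := ih fA2 (2*t) j (t + r) (k - t) (by omega) (by omega) (by omega) (by omega)
              (by omega) (by omega) (by omega)
            rw [if_neg (by omega)] at this
            rw [show (2*t - (t + r) : Int) = t - r from by ring] at this
            rw [show (r + r + (t - r) : Int) = t + r from by ring]
            rw [show (k - r - (t - r) : Int) = k - t from by ring]
            exact this

theorem powLoop_aux (e : Nat) : ∀ (fuel : Nat) (t K : Int), 1 ≤ t → t * 2^e ≤ K → K < t * 2^(e+1) →
    e + 1 ≤ fuel → powLoopB fuel t K = t * 2^e := by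
  induction e with
  | zero =>
    intro fuel t K ht hlo hhi hf
    match fuel, hf with
    | f+1, _ =>
      have hng : ¬ (2 * t ≤ K) := by
        rw [pow_succ, pow_zero, one_mul] at hhi; omega
      simp only [powLoopB, if_neg hng, pow_zero, mul_one]
  | succ e ih =>
    intro fuel t K ht hlo hhi hf
    match fuel, hf with
    | f+1, hf =>
      have hp : (1:Int) ≤ 2^e := one_le_pow₀ (by norm_num)
      have e1 : t * 2^(e+1) = (2*t) * 2^e := by ring
      have e2 : t * 2^(e+1+1) = (2*t) * 2^(e+1) := by ring
      have hg : 2 * t ≤ K := by nlinarith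
      have ihh := ih f (2*t) K (by omega) (by rw [e1] at hlo; exact hlo) (by rw [e2] at hhi; exact hhi) (by omega)
      simp only [powLoopB, if_pos hg, ihh]
      ring

theorem pl_eval (d : Nat) (K : Int) (h1 : (2:Int)^d ≤ K) (h2 : K < 2^(d+1)) :
    powLoopB K.toNat 1 K = 2^d := by
  have hd2 : ((d:Int) + 1) ≤ 2^d := by
    have := Nat.lt_two_pow_self (n := d)
    have h3 : (d:Int) < (2:Int)^d := by exact_mod_cast this
    omega
  have := powLoop_aux d K.toNat 1 K (by norm_num) (by simpa using h1) (by simpa using h2)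
    (by omega)
  simpa using this

def ALTPOS (N K : Int) : String :=
  if N < K then "0 -1"
  else
    let t := powLoopB K.toNat 1 K
    let q := PySem.Int.floordiv (N - t + 1) t
    let r := PySem.Int.mod (N - t + 1) t
    mkOutB (if K - t + 1 ≤ r then q + 1 else q)

theorem arith (K0 : Nat) : ∀ (t q r k : Int) (d : Nat), t = 2^d →
    0 ≤ r → r < t → 1 ≤ q → 1 ≤ k → k.toNat ≤ K0 →
    REF t q r k = ALTPOS (q*t + r + t - 1) (k + t - 1) := by
  induction K0 with
  | zero => intro t q r k d htd hr0 hrt hq hk hK; omega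
  | succ K0 ih =>
    intro t q r k d htd hr0 hrt hq hk hK
    have ht : 1 ≤ t := by rw [htd]; exact one_le_pow₀ (by norm_num)
    have h2t : (2:Int) * t = 2^(d+1) := by rw [htd]; ring
    by_cases hkt : k ≤ t
    · -- the answer lies in the current layer
      have hpl : powLoopB (k + t - 1).toNat 1 (k + t - 1) = t := by
        have h := pl_eval d (k + t - 1) (by rw [← htd]; omega) (by rw [pow_succ, ← htd]; omega)
        rw [← htd] at h; exact h
      have hfd : PySem.Int.floordiv (q*t + r + t - 1 - t + 1) t = q := by
        apply (PySem.Int.floordiv_eq_iff_of_pos (by omega)).mpr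
        constructor
        · nlinarith
        · nlinarith
      have hmd : PySem.Int.mod (q*t + r + t - 1 - t + 1) t = r := by
        have := PySem.Int.floordiv_mul_add_mod (q*t + r + t - 1 - t + 1) t
        rw [hfd] at this; omega
      have hNK : ¬ (q*t + r + t - 1 < k + t - 1) := by nlinarith
      rw [ALTPOS, if_neg hNK]
      simp only [hpl, hfd, hmd]
      simp only [show (k + t - 1 - t + 1 : Int) = k from by ring]
      by_cases hkr : k ≤ r
      · rw [REF_le_r t q r k hk hkr hrt, if_pos hkr]
      · rw [REF_le_t t q r k (by omega) hkt, if_neg hkr]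
    · -- k > t : layer is passed
      rcases (show q = 1 ∨ q = 2 ∨ 3 ≤ q by omega) with hq1 | hq2 | hq3
      · subst hq1
        rw [REF_q1 t r k ht hr0 (by omega)]
        by_cases hend : k ≤ t + r
        · rw [if_pos hend, ALTPOS, if_neg (by omega)]
          have hpl : powLoopB (k + t - 1).toNat 1 (k + t - 1) = 2*t := by
            have h := pl_eval (d+1) (k + t - 1) (by rw [← h2t]; omega) (by rw [pow_succ, ← h2t]; omega)
            rw [← h2t] at h; exact h
          have hfd : PySem.Int.floordiv (1*t + r + t - 1 - (2*t) + 1) (2*t) = 0 := by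
            apply (PySem.Int.floordiv_eq_iff_of_pos (by omega)).mpr
            constructor <;> [nlinarith; nlinarith]
          have hmd : PySem.Int.mod (1*t + r + t - 1 - (2*t) + 1) (2*t) = r := by
            have := PySem.Int.floordiv_mul_add_mod (1*t + r + t - 1 - (2*t) + 1) (2*t)
            rw [hfd] at this; omega
          simp only [hpl, hfd, hmd]
          simp only [show (k + t - 1 - 2*t + 1 : Int) = k - t from by ring]
          rw [if_pos (by omega)]
          norm_num
        · rw [if_neg hend, ALTPOS, if_pos (by omega)]
      · subst hq2
        rw [REF_q2 t r k ht (by omega)]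
        by_cases hend : k ≤ 2*t + r
        · rw [if_pos hend, ALTPOS, if_neg (by omega)]
          have hpl : powLoopB (k + t - 1).toNat 1 (k + t - 1) = 2*t := by
            have h := pl_eval (d+1) (k + t - 1) (by rw [← h2t]; omega) (by rw [pow_succ, ← h2t]; omega)
            rw [← h2t] at h; exact h
          have hfd : PySem.Int.floordiv (2*t + r + t - 1 - (2*t) + 1) (2*t) = 0 := by
            apply (PySem.Int.floordiv_eq_iff_of_pos (by omega)).mpr
            constructor <;> [nlinarith; nlinarith]
          have hmd : PySem.Int.mod (2*t + r + t - 1 - (2*t) + 1) (2*t) = t + r := by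
            have := PySem.Int.floordiv_mul_add_mod (2*t + r + t - 1 - (2*t) + 1) (2*t)
            rw [hfd] at this; omega
          simp only [hpl, hfd, hmd]
          simp only [show (k + t - 1 - 2*t + 1 : Int) = k - t from by ring]
          rw [if_pos (by omega)]
          norm_num
        · rw [if_neg hend, ALTPOS, if_pos (by omega)]
      · -- recurse into the next layer
        rw [REF_rec t q r k hq3 ht (by omega)]
        set x : Int := q*t + r - t with hx
        have hq' : 1 ≤ PySem.Int.floordiv x (2*t) := by
          rw [(PySem.Int.le_floordiv_iff_mul_le (by omega))]
          nlinarith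
        have hmod := PySem.Int.floordiv_mul_add_mod x (2*t)
        have hm0 : 0 ≤ PySem.Int.mod x (2*t) := by
          rw [PySem.Int.mod_eq_emod_of_pos (by omega)]
          exact Int.emod_nonneg _ (by omega)
        have hm1 : PySem.Int.mod x (2*t) < 2*t := by
          rw [PySem.Int.mod_eq_emod_of_pos (by omega)]
          exact Int.emod_lt_of_pos _ (by omega)
        have := ih (2*t) (PySem.Int.floordiv x (2*t)) (PySem.Int.mod x (2*t)) (k - t) (d+1)
          (by rw [h2t]) hm0 hm1 hq' (by omega) (by omega)
        rw [this]
        have hN : PySem.Int.floordiv x (2*t) * (2*t) + PySem.Int.mod x (2*t) + 2*t - 1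
            = q*t + r + t - 1 := by omega
        have hK : k - t + 2*t - 1 = k + t - 1 := by ring
        rw [hN, hK]

theorem main_eq : ∀ (n k : Int), Pre_solve n k → solve n k = solve_alt n k := by
  intro n k hpre
  have hof : (PySem.Dict.ofList [(n, (1:Int))]) = PySem.Dict.mk [(n, 1)] := rfl
  show solveLoopA (k.toNat + 1) (PySem.Dict.ofList [(n, 1)]) k = solve_alt n k
  rw [hof]
  by_cases hk1 : k ≤ 1
  · have hmax : PySem.List.max? (PySem.Dict.mk [(n, (1:Int))]).keys (fun x => x) = some n :=
      max?_keys_mk _ n 1 (by simp) (by intro p hp; simp at hp; simp [hp])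
    rw [stepA k.toNat _ k n 1 hmax (get?_head n 1 [])]
    rw [if_pos (show (1:Int) ≥ k by omega)]
    rw [fmt_eq n]
    simp only [solve_alt, if_pos hk1]
    rfl
  · have hn0 : 0 ≤ n := hpre (by omega)
    by_cases hn1 : 1 ≤ n
    · have hA := pos_loop k.toNat (k.toNat + 1) 1 n 0 k (by omega) le_rfl (by omega) hn1
        (by omega) (by omega) (by omega)
      rw [if_pos rfl] at hA
      rw [hA]
      have hB := arith k.toNat 1 n 0 k 0 (by norm_num) le_rfl (by omega) hn1 (by omega) (by omega)
      rw [show (n*1 + 0 + 1 - 1 : Int) = n from by ring, show (k + 1 - 1 : Int) = k from by ring] at hB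
      rw [hB, ALTPOS]
      by_cases hkn : n < k
      · rw [if_pos hkn]
        simp only [solve_alt, if_neg hk1, if_pos (show k > n by omega)]
        decide
      · rw [if_neg hkn]
        simp only [solve_alt, if_neg hk1, if_neg (show ¬ k > n by omega)]
        rfl
    · have hz : n = 0 := by omega
      subst hz
      rw [tail0 (k.toNat + 1) 1 k (by omega) (by omega)]
      simp only [solve_alt, if_neg hk1, if_pos (show k > 0 by omega)]
      decide

-- ===== VERDICT (by name: the statement is the Claim_ definition above) =====
theorem solve_spec : Claim_equal_solve := fun n k _ hpre => main_eq n k hpre
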